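-- pv_equiv track=rewrite | github.com/sezif5/WWBIM.extension | WWBIM.extension/WW.BIM.tab/BIM.panel/ПересеченияNEW.pushbutton/collisionsNEW_script.py | build_navigator_rows
-- ===== SOURCE A (Python) =====
-- def build_clash_key(test_name, clash_name, id1, id2):
--     """Строит стабильный ключ коллизии для статуса/комментария."""
--     try:
--         a = int(id1) if id1 is not None else 0
--     except Exception:
--         a = 0
--     try:
--         b = int(id2) if id2 is not None else 0
--     except Exception:
--         b = 0
--
--     if a and b:
--         lo, hi = (a, b) if a < b else (b, a)
--         pair = "{}:{}".format(lo, hi)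
--     else:
--         pair = "{}:{}".format(a, b)
--
--     return "{}|{}|{}".format(
--         (test_name or "").strip(), (clash_name or "").strip(), pair
--     )
--
-- def build_navigator_rows(grouped_by_model, comments_map):
--     """Преобразует grouped_by_model в плоский набор строк для интерактивного грида."""
--     rows = []
--
--     for model_name in sorted(grouped_by_model.keys(), key=lambda s: s.lower()):
--         test_groups = grouped_by_model[model_name]
--         for test_name in sorted(test_groups.keys(), key=lambda s: s.lower()):
--             for item in test_groups[test_name]:
--                 row = dict(item)
--                 row["model"] = model_name
--                 row["test"] = test_name
--                 clash_key = row.get("clash_key") or build_clash_key(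
--                     test_name,
--                     row.get("name"),
--                     row.get("id"),
--                     row.get("id_other"),
--                 )
--                 row["clash_key"] = clash_key
--                 row["comment"] = comments_map.get(clash_key, "")
--                 rows.append(row)
--
--     return rows
-- ===== SOURCE B (Python) =====
-- def build_clash_key(test_name, clash_name, id1, id2):
--     """Строит стабильный ключ коллизии для статуса/комментария."""
--     try:
--         a = int(id1) if id1 is not None else 0
--     except Exception:
--         a = 0
--     try:
--         b = int(id2) if id2 is not None else 0
--     except Exception:
--         b = 0
--
--     if a and b:
--         lo, hi = (a, b) if a < b else (b, a)
--         pair = "{}:{}".format(lo, hi)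
--     else:
--         pair = "{}:{}".format(a, b)
--
--     return "{}|{}|{}".format(
--         (test_name or "").strip(), (clash_name or "").strip(), pair
--     )
--
--
-- def _make_row(comments_map, model_name, test_name, item):
--     row = dict(item)
--     row["model"] = model_name
--     row["test"] = test_name
--     clash_key = row.get("clash_key") or build_clash_key(
--         test_name, row.get("name"), row.get("id"), row.get("id_other")
--     )
--     row["clash_key"] = clash_key
--     row["comment"] = comments_map.get(clash_key, "")
--     return row
--
--
-- def build_navigator_rows(grouped_by_model, comments_map):
--     flat = []
--     for model_name, test_groups in grouped_by_model.items():
--         for test_name, items in test_groups.items():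
--             flat.append((model_name, test_name, items))
--     flat.sort(key=lambda e: (e[0].lower(), e[1].lower()))
--     rows = []
--     for model_name, test_name, items in flat:
--         for item in items:
--             rows.append(_make_row(comments_map, model_name, test_name, item))
--     return rows
-- ===== Notes on version B (the rewrite author's own statement) =====
-- stated objective: alternative
-- what changed: A walks models sorted case-insensitively and, nested inside, tests sorted case-insensitively, appending rows; B flattens the grouped dict once into (model, test, items) triples, stably sorts that flat list once by the (model.lower(), test.lower()) tuple key, and then emits the rows in a single pass.
import Mathlib
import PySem

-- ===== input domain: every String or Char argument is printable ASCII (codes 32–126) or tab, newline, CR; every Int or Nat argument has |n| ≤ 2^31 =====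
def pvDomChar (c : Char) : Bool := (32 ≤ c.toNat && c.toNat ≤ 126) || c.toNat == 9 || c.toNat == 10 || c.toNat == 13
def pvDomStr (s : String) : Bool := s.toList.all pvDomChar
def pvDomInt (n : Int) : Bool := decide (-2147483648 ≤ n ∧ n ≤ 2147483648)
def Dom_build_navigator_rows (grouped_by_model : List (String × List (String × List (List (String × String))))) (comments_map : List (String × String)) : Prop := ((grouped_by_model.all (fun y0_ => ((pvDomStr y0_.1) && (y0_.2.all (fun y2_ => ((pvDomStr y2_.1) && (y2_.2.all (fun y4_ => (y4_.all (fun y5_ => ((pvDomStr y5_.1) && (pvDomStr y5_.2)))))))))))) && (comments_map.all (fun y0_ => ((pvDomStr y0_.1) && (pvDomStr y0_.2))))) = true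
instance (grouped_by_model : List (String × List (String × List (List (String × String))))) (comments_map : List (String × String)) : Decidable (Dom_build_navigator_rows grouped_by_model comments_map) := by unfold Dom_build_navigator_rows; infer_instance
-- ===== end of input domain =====

-- ===== PORT A =====
-- B replaces A's nested sorted loops by one flatten pass plus a single stable flat sort (alternative decomposition; return value only).

-- helper: Python build_clash_key (shared module helper, used by both implementations)
def pvClashKey (test_name : String) (clash_name : Option String) (id1 id2 : Option String) : String :=
  let a : Int := match id1 with
    | none => 0
    | some s => (PySem.Int.ofStr? s).getD 0
  let b : Int := match id2 with
    | none => 0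
    | some s => (PySem.Int.ofStr? s).getD 0
  let pair : String :=
    if a ≠ 0 ∧ b ≠ 0 then
      if a < b then PySem.Int.toStr a ++ ":" ++ PySem.Int.toStr b
      else PySem.Int.toStr b ++ ":" ++ PySem.Int.toStr a
    else PySem.Int.toStr a ++ ":" ++ PySem.Int.toStr b
  PySem.Str.strip test_name ++ "|" ++ PySem.Str.strip (clash_name.getD "") ++ "|" ++ pair

-- helper: the per-item row construction (identical in A's and B's loop bodies)
def pvRow (cm : PySem.Dict String String) (model test : String) (item : List (String × String)) : List (String × String) :=
  let row := PySem.Dict.ofList item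
  let row := row.insert "model" model
  let row := row.insert "test" test
  let ck : String := match row.get? "clash_key" with
    | some s =>
        if s = "" then pvClashKey test (row.get? "name") (row.get? "id") (row.get? "id_other") else s
    | none => pvClashKey test (row.get? "name") (row.get? "id") (row.get? "id_other")
  let row := row.insert "clash_key" ck
  let row := row.insert "comment" (cm.getD ck "")
  row.items

def build_navigator_rows (grouped_by_model : List (String × List (String × List (List (String × String))))) (comments_map : List (String × String)) : List (List (String × String)) :=
  let d := PySem.Dict.ofList grouped_by_model
  let cmd := PySem.Dict.ofList comments_map
  (PySem.List.sorted d.keys (fun s => PySem.Str.lower s) false).foldl (fun rows model_name =>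
    let tgd := PySem.Dict.ofList (d.getD model_name [])
    (PySem.List.sorted tgd.keys (fun s => PySem.Str.lower s) false).foldl (fun rows test_name =>
      (tgd.getD test_name []).foldl (fun rows item =>
        rows ++ [pvRow cmd model_name test_name item]) rows) rows) []

-- ===== PORT B =====
def build_navigator_rows_alt (grouped_by_model : List (String × List (String × List (List (String × String))))) (comments_map : List (String × String)) : List (List (String × String)) :=
  let cmd := PySem.Dict.ofList comments_map
  let flat := (PySem.Dict.ofList grouped_by_model).items.foldl (fun acc p =>
      (PySem.Dict.ofList p.2).items.foldl (fun acc q => acc ++ [(p.1, q.1, q.2)]) acc) []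
  let flatS := PySem.List.sorted2 flat (fun e => PySem.Str.lower e.1) (fun e => PySem.Str.lower e.2.1) false
  flatS.foldl (fun rows e =>
    e.2.2.foldl (fun rows item => rows ++ [pvRow cmd e.1 e.2.1 item]) rows) []

-- ===== PRECONDITION & SPEC =====
-- Pre_ excludes inputs where two DISTINCT model keys are equal case-insensitively: there the relative
-- order of their rows is an unspecified tie of the case-insensitive sort (A breaks it per whole model by
-- dict insertion order, B by the flat (model, test) key) and both orders are defensible.
def Pre_build_navigator_rows (grouped_by_model : List (String × List (String × List (List (String × String))))) (comments_map : List (String × String)) : Prop :=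
  List.Pairwise (fun a b => PySem.Str.lower a = PySem.Str.lower b → a = b) (grouped_by_model.map Prod.fst)
instance (grouped_by_model : List (String × List (String × List (List (String × String))))) (comments_map : List (String × String)) : Decidable (Pre_build_navigator_rows grouped_by_model comments_map) := by unfold Pre_build_navigator_rows; infer_instance

def pvWitness_build_navigator_rows : (List (String × List (String × List (List (String × String))))) × (List (String × String)) :=
  ([("M1", [("t1", [[("name", "w"), ("id", "2"), ("id_other", "1")]])]), ("m2", [])], [("t1|w|1:2", "ok")])

def Spec_build_navigator_rows (grouped_by_model : List (String × List (String × List (List (String × String))))) (comments_map : List (String × String)) (out : List (List (String × String))) : Prop := out = build_navigator_rows_alt grouped_by_model comments_map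
instance (grouped_by_model : List (String × List (String × List (List (String × String))))) (comments_map : List (String × String)) (out : List (List (String × String))) : Decidable (Spec_build_navigator_rows grouped_by_model comments_map out) := by unfold Spec_build_navigator_rows; infer_instance

-- ===== CLAIM (what is proved, stated in full; the proofs are below) =====
def Claim_equal_build_navigator_rows : Prop := ∀ (grouped_by_model : List (String × List (String × List (List (String × String))))) (comments_map : List (String × String)), Dom_build_navigator_rows grouped_by_model comments_map → Pre_build_navigator_rows grouped_by_model comments_map → Spec_build_navigator_rows grouped_by_model comments_map (build_navigator_rows grouped_by_model comments_map)

-- ===== LEMMAS AND PROOFS =====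

-- the comparison sorted2 uses on B's flat triples
def pvBef (a b : String × String × List (List (String × String))) : Bool :=
  decide (PySem.Str.lower a.1 < PySem.Str.lower b.1) ||
    (!decide (PySem.Str.lower b.1 < PySem.Str.lower a.1) && decide (PySem.Str.lower a.2.1 < PySem.Str.lower b.2.1))

lemma pv_sorted2_eq_fold (xs : List (String × String × List (List (String × String)))) :
    PySem.List.sorted2 xs (fun e => PySem.Str.lower e.1) (fun e => PySem.Str.lower e.2.1) false
      = xs.foldl (fun acc x => PySem.List.insertBy pvBef x acc) [] := rfl

-- inserting past a prefix it never goes before, and before a suffix it always goes before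
lemma pv_insertBy_mid {A : Type} (bef : A → A → Bool) (x : A) (pre mid post : List A)
    (h1 : ∀ z ∈ pre, bef x z = false) (h2 : ∀ y ∈ post, bef x y = true) :
    PySem.List.insertBy bef x (pre ++ mid ++ post) = pre ++ PySem.List.insertBy bef x mid ++ post := by
  induction pre with
  | cons a pre ih =>
      have ha := h1 a (by simp)
      simp only [List.cons_append, PySem.List.insertBy, ha]
      simp only [Bool.false_eq_true, if_false]
      rw [ih (fun z hz => h1 z (by simp [hz]))]
  | nil =>
      simp only [List.nil_append]
      induction mid with
      | cons a t iht =>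
          cases hb : bef x a with
          | true => simp [PySem.List.insertBy, hb]
          | false => simp [PySem.List.insertBy, hb, iht]
      | nil =>
          cases post with
          | nil => simp [PySem.List.insertBy]
          | cons y ys => simp [PySem.List.insertBy, h2 y (by simp)]

-- folding a whole block into a split accumulator
lemma pv_foldl_insertBy_mid {A : Type} (bef : A → A → Bool) (es pre mid post : List A)
    (h1 : ∀ e ∈ es, ∀ z ∈ pre, bef e z = false) (h2 : ∀ e ∈ es, ∀ y ∈ post, bef e y = true) :
    es.foldl (fun acc e => PySem.List.insertBy bef e acc) (pre ++ mid ++ post)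
      = pre ++ es.foldl (fun acc e => PySem.List.insertBy bef e acc) mid ++ post := by
  induction es generalizing mid with
  | nil => simp
  | cons e es ih =>
      simp only [List.foldl_cons]
      rw [pv_insertBy_mid bef e pre mid post (h1 e (by simp)) (h2 e (by simp)),
        ih _ (fun e' he' => h1 e' (by simp [he'])) (fun e' he' => h2 e' (by simp [he']))]

lemma pv_foldl_insertBy_perm {A : Type} (bef : A → A → Bool) (l acc : List A) :
    (l.foldl (fun acc e => PySem.List.insertBy bef e acc) acc).Perm (acc ++ l) := by
  induction l generalizing acc with
  | nil => simp
  | cons e l ih =>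
      simp only [List.foldl_cons]
      refine (ih _).trans ?_
      refine (List.Perm.append_right l (PySem.List.insertBy_perm bef e acc)).trans ?_
      exact List.perm_middle.symm

lemma pv_insertBy_map {A B : Type} (f : A → B) (bef : B → B → Bool) (bef' : A → A → Bool)
    (h : ∀ a b, bef (f a) (f b) = bef' a b) (x : A) (l : List A) :
    PySem.List.insertBy bef (f x) (l.map f) = (PySem.List.insertBy bef' x l).map f := by
  induction l with
  | nil => simp [PySem.List.insertBy]
  | cons a t ih =>
      cases hb : bef' x a with
      | true => simp [PySem.List.insertBy, h, hb]
      | false => simp [PySem.List.insertBy, h, hb, ih]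

lemma pv_foldl_insertBy_map {A B : Type} (f : A → B) (bef : B → B → Bool) (bef' : A → A → Bool)
    (h : ∀ a b, bef (f a) (f b) = bef' a b) (l acc : List A) :
    (l.map f).foldl (fun acc e => PySem.List.insertBy bef e acc) (acc.map f)
      = (l.foldl (fun acc e => PySem.List.insertBy bef' e acc) acc).map f := by
  induction l generalizing acc with
  | nil => simp
  | cons a t ih =>
      simp only [List.map_cons, List.foldl_cons]
      rw [pv_insertBy_map f bef bef' h a acc, ih]

-- stable sort commutes with map along a comparison-preserving function
lemma pv_sorted_map {A B K : Type} [LinearOrder K] (f : A → B) (key : B → K) (l : List A) :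
    PySem.List.sorted (l.map f) key false = (PySem.List.sorted l (fun a => key (f a)) false).map f := by
  rw [PySem.List.sorted_eq_foldl_insertBy, PySem.List.sorted_eq_foldl_insertBy]
  have := pv_foldl_insertBy_map f (fun a b => decide (key a < key b))
    (fun a b => decide (key (f a) < key (f b))) (fun a b => rfl) l []
  simpa using this

-- a ≤-sorted list splits at a threshold into its filtered prefix and suffix
lemma pv_sorted_split {A K : Type} [LinearOrder K] (f : A → K) (c : K) (l : List A)
    (h : l.Pairwise (fun a b => f a ≤ f b)) :
    l = l.filter (fun a => decide (f a < c)) ++ l.filter (fun a => !decide (f a < c)) := by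
  induction l with
  | nil => simp
  | cons a t ih =>
      have hle : ∀ b ∈ t, f a ≤ f b := fun b hb => (List.pairwise_cons.mp h).1 b hb
      have ht := ih (List.pairwise_cons.mp h).2
      by_cases hc : f a < c
      · simp only [List.filter_cons, hc, decide_true, Bool.not_true, if_true]
        simpa using ht
      · have h2 : ∀ b ∈ t, ¬ (f b < c) := fun b hb hbc => hc (lt_of_le_of_lt (hle b hb) hbc)
        have hft : t.filter (fun a => decide (f a < c)) = [] := by
          rw [List.filter_eq_nil_iff]; intro b hb; simpa using h2 b hb
        have hft2 : t.filter (fun a => !decide (f a < c)) = t := by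
          rw [List.filter_eq_self]; intro b hb; simpa using h2 b hb
        simp [List.filter_cons, hc, hft, hft2]

-- flat stable sort of key-homogeneous blocks = sort of the blocks, each block sorted
lemma pv_flatsort (ms : List (String × List (String × List (List (String × String)))))
    (blk : String × List (String × List (List (String × String))) → List (String × String × List (List (String × String))))
    (hkey : ∀ p ∈ ms, ∀ e ∈ blk p, e.1 = p.1)
    (hnd : (ms.map (fun p => PySem.Str.lower p.1)).Nodup) :
    (ms.flatMap blk).foldl (fun acc e => PySem.List.insertBy pvBef e acc) []
      = (PySem.List.sorted ms (fun p => PySem.Str.lower p.1) false).flatMap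
          (fun p => (blk p).foldl (fun acc e => PySem.List.insertBy pvBef e acc) []) := by
  induction ms using List.reverseRecOn with
  | nil => simp [PySem.List.sorted]
  | append_singleton ms p ih =>
      have hkey' : ∀ q ∈ ms, ∀ e ∈ blk q, e.1 = q.1 := fun q hq => hkey q (by simp [hq])
      have hnd' : (ms.map (fun p => PySem.Str.lower p.1)).Nodup := by
        simpa using (List.nodup_append.mp (by simpa using hnd)).1
      have hc : ∀ q ∈ ms, PySem.Str.lower q.1 ≠ PySem.Str.lower p.1 := by
        intro q hq heq
        have h2 : ((ms.map (fun p => PySem.Str.lower p.1)) ++ [PySem.Str.lower p.1]).Nodup := by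
          simpa using hnd
        rw [List.nodup_append] at h2
        have hb' : PySem.Str.lower p.1 ∈ ms.map (fun p => PySem.Str.lower p.1) :=
          heq ▸ List.mem_map_of_mem hq
        exact h2.2.2 (PySem.Str.lower p.1) hb' (PySem.Str.lower p.1) (by simp) rfl
      have IH := ih hkey' hnd'
      set c := PySem.Str.lower p.1 with hcdef
      set S' := PySem.List.sorted ms (fun p => PySem.Str.lower p.1) false with hS'
      have hmemS' : ∀ q ∈ S', q ∈ ms := fun q hq => (PySem.List.mem_sorted ms _ false q).mp hq
      have hpw : S'.Pairwise (fun a b => PySem.Str.lower a.1 ≤ PySem.Str.lower b.1) :=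
        PySem.List.sorted_pairwise ms _
      have hsplit := pv_sorted_split (fun (q : String × List (String × List (List (String × String)))) => PySem.Str.lower q.1) c S' hpw
      set pre := S'.filter (fun a => decide (PySem.Str.lower a.1 < c)) with hpre
      set post := S'.filter (fun a => !decide (PySem.Str.lower a.1 < c)) with hpost
      set g : String × List (String × List (List (String × String))) → List (String × String × List (List (String × String))) :=
        (fun p => (blk p).foldl (fun acc e => PySem.List.insertBy pvBef e acc) []) with hg
      have hmemg : ∀ q z, z ∈ g q → z ∈ blk q := by
        intro q z hz
        have := (pv_foldl_insertBy_perm pvBef (blk q) []).mem_iff.mp hz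
        simpa using this
      have cond1 : ∀ e ∈ blk p, ∀ z ∈ pre.flatMap g, pvBef e z = false := by
        intro e he z hz
        obtain ⟨q, hqpre, hzq⟩ := List.mem_flatMap.mp hz
        have hq1 : PySem.Str.lower q.1 < c := by
          have := List.of_mem_filter hqpre; simpa using this
        have hqms : q ∈ ms := hmemS' q (List.mem_of_mem_filter hqpre)
        have hz1 : z.1 = q.1 := hkey' q hqms z (hmemg q z hzq)
        have he1 : e.1 = p.1 := hkey p (by simp) e he
        simp only [pvBef, he1, hz1, ← hcdef]
        have h1 : ¬ (c < PySem.Str.lower q.1) := not_lt_of_gt hq1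
        simp [h1, hq1]
      have cond2 : ∀ e ∈ blk p, ∀ z ∈ post.flatMap g, pvBef e z = true := by
        intro e he z hz
        obtain ⟨q, hqpost, hzq⟩ := List.mem_flatMap.mp hz
        have hq1 : ¬ (PySem.Str.lower q.1 < c) := by
          have := List.of_mem_filter hqpost; simpa using this
        have hqms : q ∈ ms := hmemS' q (List.mem_of_mem_filter hqpost)
        have hgt : c < PySem.Str.lower q.1 := lt_of_le_of_ne (not_lt.mp hq1) (Ne.symm (hc q hqms))
        have hz1 : z.1 = q.1 := hkey' q hqms z (hmemg q z hzq)
        have he1 : e.1 = p.1 := hkey p (by simp) e he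
        simp [pvBef, he1, hz1, ← hcdef, hgt]
      have lhs1 : (List.flatMap blk (ms ++ [p])).foldl (fun acc e => PySem.List.insertBy pvBef e acc) []
          = (blk p).foldl (fun acc e => PySem.List.insertBy pvBef e acc) (S'.flatMap g) := by
        rw [List.flatMap_append, List.foldl_append, IH]
        simp
      have lhs2 : (blk p).foldl (fun acc e => PySem.List.insertBy pvBef e acc) (S'.flatMap g)
          = pre.flatMap g ++ g p ++ post.flatMap g := by
        conv_lhs => rw [hsplit]
        rw [List.flatMap_append]
        have := pv_foldl_insertBy_mid pvBef (blk p) (pre.flatMap g) [] (post.flatMap g) cond1 cond2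
        simpa using this
      have rhs1 : PySem.List.sorted (ms ++ [p]) (fun q => PySem.Str.lower q.1) false
          = pre ++ [p] ++ post := by
        rw [PySem.List.sorted_eq_foldl_insertBy, List.foldl_append]
        rw [← PySem.List.sorted_eq_foldl_insertBy, ← hS']
        simp only [List.foldl_cons, List.foldl_nil]
        conv_lhs => rw [hsplit]
        have := pv_insertBy_mid (fun a b => decide (PySem.Str.lower a.1 < PySem.Str.lower b.1)) p pre [] post
          (by intro z hz
              have h1 : PySem.Str.lower z.1 < c := by have := List.of_mem_filter hz; simpa using this
              simpa [hcdef] using not_lt_of_gt h1)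
          (by intro y hy
              have hq1 : ¬ (PySem.Str.lower y.1 < c) := by have := List.of_mem_filter hy; simpa using this
              have hyms : y ∈ ms := hmemS' y (List.mem_of_mem_filter hy)
              have hgt : c < PySem.Str.lower y.1 := lt_of_le_of_ne (not_lt.mp hq1) (Ne.symm (hc y hyms))
              simpa [hcdef] using hgt)
        simpa [PySem.List.insertBy] using this
      rw [lhs1, lhs2, rhs1]
      simp [List.flatMap_append]

-- iterating a dict's sorted keys with lookups = iterating its sorted items
lemma pv_dictsort {V R : Type} (d : PySem.Dict String V) (dfl : V) (g : String → V → List R)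
    (hnd : d.keys.Nodup) :
    (PySem.List.sorted d.keys (fun s => PySem.Str.lower s) false).flatMap (fun k => g k (d.getD k dfl))
      = (PySem.List.sorted d.items (fun p => PySem.Str.lower p.1) false).flatMap (fun p => g p.1 p.2) := by
  have hk : d.keys = d.items.map Prod.fst := rfl
  rw [hk, pv_sorted_map Prod.fst (fun s => PySem.Str.lower s) d.items, List.flatMap_map]
  refine List.flatMap_congr ?_
  intro p hp
  have hpi : p ∈ d.items := (PySem.List.mem_sorted _ _ _ p).mp hp
  have h2 := PySem.Dict.getD_of_mem_items d (k := p.1) (v := p.2) (by simpa using hpi) hnd dfl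
  rw [h2]

lemma pv_main (gbm : List (String × List (String × List (List (String × String))))) (cm : List (String × String))
    (hpre : Pre_build_navigator_rows gbm cm) :
    build_navigator_rows gbm cm = build_navigator_rows_alt gbm cm := by
  have hA : build_navigator_rows gbm cm
      = (PySem.List.sorted (PySem.Dict.ofList gbm).keys (fun s => PySem.Str.lower s) false).flatMap
          (fun m => (PySem.List.sorted (PySem.Dict.ofList ((PySem.Dict.ofList gbm).getD m [])).keys (fun s => PySem.Str.lower s) false).flatMap
            (fun t => ((PySem.Dict.ofList ((PySem.Dict.ofList gbm).getD m [])).getD t []).map (pvRow (PySem.Dict.ofList cm) m t))) := by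
    simp only [build_navigator_rows, PySem.List.foldl_append_singleton_eq_map,
      PySem.List.foldl_append_eq_flatMap, List.nil_append]
  have hB : build_navigator_rows_alt gbm cm
      = (PySem.List.sorted2 ((PySem.Dict.ofList gbm).items.flatMap (fun p => (PySem.Dict.ofList p.2).items.map (fun q => (p.1, q.1, q.2))))
            (fun e => PySem.Str.lower e.1) (fun e => PySem.Str.lower e.2.1) false).flatMap
          (fun e => e.2.2.map (pvRow (PySem.Dict.ofList cm) e.1 e.2.1)) := by
    simp only [build_navigator_rows_alt, PySem.List.foldl_append_singleton_eq_map,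
      PySem.List.foldl_append_eq_flatMap, List.nil_append]
  have hknd : (PySem.Dict.ofList gbm).keys.Nodup := PySem.Dict.nodup_keys_ofList gbm
  have hmemk : ∀ k ∈ (PySem.Dict.ofList gbm).keys, k ∈ gbm.map Prod.fst := by
    intro k hk
    have h1 : (PySem.Dict.ofList gbm).keys
        = PySem.Set.update (PySem.Dict.empty (κ := String) (ν := List (String × List (List (String × String))))).keys (gbm.map Prod.fst) :=
      PySem.Dict.keys_foldl_insert_key gbm Prod.fst (fun d x => x.2) PySem.Dict.empty
    rw [h1] at hk
    exact (PySem.Set.mem_ofList (gbm.map Prod.fst) k).mp hk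
  have hlownd : ((PySem.Dict.ofList gbm).items.map (fun p => PySem.Str.lower p.1)).Nodup := by
    have h1 : (PySem.Dict.ofList gbm).items.map (fun p => PySem.Str.lower p.1)
        = (PySem.Dict.ofList gbm).keys.map (fun s => PySem.Str.lower s) := by
      rw [show (PySem.Dict.ofList gbm).keys = (PySem.Dict.ofList gbm).items.map Prod.fst from rfl, List.map_map]
      rfl
    rw [h1]
    have hsym : Symmetric (fun a b : String => PySem.Str.lower a = PySem.Str.lower b → a = b) := by
      intro x y h h2
      exact (h h2.symm).symm
    have hfa := List.Pairwise.forall hsym hpre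
    have hpw : (PySem.Dict.ofList gbm).keys.Pairwise (fun a b => PySem.Str.lower a ≠ PySem.Str.lower b) := by
      refine hknd.pairwise_of_forall_ne ?_
      intro a ha b hb hne heq
      exact hne (hfa (hmemk a ha) (hmemk b hb) hne heq)
    exact List.pairwise_map.mpr hpw
  have hkeyblk : ∀ p ∈ (PySem.Dict.ofList gbm).items,
      ∀ e ∈ (PySem.Dict.ofList p.2).items.map (fun q => (p.1, q.1, q.2)), e.1 = p.1 := by
    intro p _ e he
    obtain ⟨q, _, hq⟩ := List.mem_map.mp he
    rw [← hq]
  have hblock : ∀ (p : String × List (String × List (List (String × String)))),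
      ((PySem.Dict.ofList p.2).items.map (fun q => (p.1, q.1, q.2))).foldl (fun acc e => PySem.List.insertBy pvBef e acc) []
        = (PySem.List.sorted (PySem.Dict.ofList p.2).items (fun q => PySem.Str.lower q.1) false).map (fun q => (p.1, q.1, q.2)) := by
    intro p
    rw [PySem.List.sorted_eq_foldl_insertBy]
    have hb : ∀ (a b : String × List (List (String × String))),
        pvBef (p.1, a.1, a.2) (p.1, b.1, b.2) = decide (PySem.Str.lower a.1 < PySem.Str.lower b.1) := by
      intro a b
      simp [pvBef]
    have := pv_foldl_insertBy_map (fun q : String × List (List (String × String)) => (p.1, q.1, q.2)) pvBef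
      (fun a b => decide (PySem.Str.lower a.1 < PySem.Str.lower b.1)) hb ((PySem.Dict.ofList p.2).items) []
    simpa using this
  rw [hA, hB, pv_sorted2_eq_fold,
    pv_flatsort (PySem.Dict.ofList gbm).items (fun p => (PySem.Dict.ofList p.2).items.map (fun q => (p.1, q.1, q.2))) hkeyblk hlownd,
    pv_dictsort (PySem.Dict.ofList gbm) []
      (fun m tg => (PySem.List.sorted (PySem.Dict.ofList tg).keys (fun s => PySem.Str.lower s) false).flatMap
        (fun t => ((PySem.Dict.ofList tg).getD t []).map (pvRow (PySem.Dict.ofList cm) m t))) hknd,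
    List.flatMap_assoc]
  refine List.flatMap_congr ?_
  intro p _
  rw [hblock p, List.flatMap_map]
  rw [pv_dictsort (PySem.Dict.ofList p.2) []
    (fun t items => items.map (pvRow (PySem.Dict.ofList cm) p.1 t)) (PySem.Dict.nodup_keys_ofList p.2)]

-- ===== VERDICT (by name: the statement is the Claim_ definition above) =====
theorem build_navigator_rows_spec : Claim_equal_build_navigator_rows := by
  intro gbm cm _ hpre
  unfold Spec_build_navigator_rows
  exact pv_main gbm cm hpre
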